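-- pv_equiv track=rewrite | github.com/iamthegreatdestroyer/Nexuszero-Protocol | fix_tests.py | fix_compression_strategy_variants
-- ===== SOURCE A (Python) =====
-- def fix_compression_strategy_variants(content):
--     """Fix CompressionStrategy enum variants"""
--     replacements = {
--         'CompressionStrategy::TT_SVD': 'CompressionStrategy::TensorTrain',
--         'CompressionStrategy::Hybrid': 'CompressionStrategy::HybridMps',
--     }
--
--     for old, new in replacements.items():
--         content = content.replace(old, new)
--
--     return content
-- ===== SOURCE B (Python) =====
-- # Single left-to-right scan dispatching on whichever old key matches at each
-- # position, instead of two full sequential str.replace passes.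
-- _REPLACEMENTS = {
--     'CompressionStrategy::TT_SVD': 'CompressionStrategy::TensorTrain',
--     'CompressionStrategy::Hybrid': 'CompressionStrategy::HybridMps',
-- }
--
--
-- def fix_compression_strategy_variants(content):
--     """Fix CompressionStrategy enum variants"""
--     out = []
--     i, n = 0, len(content)
--     while i < n:
--         for old, new in _REPLACEMENTS.items():
--             if content.startswith(old, i):
--                 out.append(new)
--                 i += len(old)
--                 break
--         else:
--             out.append(content[i])
--             i += 1
--     return ''.join(out)
-- ===== Notes on version B (the rewrite author's own statement) =====
-- stated objective: alternative
-- what changed: Replaces two sequential full-string str.replace passes with one left-to-right scan that dispatches at each position on whichever old key matches and emits its replacement; equivalent because the two keys are mutually non-overlapping and no replacement text can create or hide an occurrence of either key.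
import Mathlib
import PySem

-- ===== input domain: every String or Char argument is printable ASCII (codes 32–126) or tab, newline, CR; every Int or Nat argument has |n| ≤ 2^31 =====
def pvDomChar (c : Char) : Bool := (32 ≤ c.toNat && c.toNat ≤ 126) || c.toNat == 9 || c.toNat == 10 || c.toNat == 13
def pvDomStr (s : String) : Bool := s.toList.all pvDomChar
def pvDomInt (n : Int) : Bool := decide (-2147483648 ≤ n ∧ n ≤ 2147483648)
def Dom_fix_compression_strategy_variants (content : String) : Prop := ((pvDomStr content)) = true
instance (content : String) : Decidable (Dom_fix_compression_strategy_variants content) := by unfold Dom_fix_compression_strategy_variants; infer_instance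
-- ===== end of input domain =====

-- B replaces A's two sequential full-string replace passes by ONE left-to-right scan
-- dispatching on whichever key matches at each position (alternative decomposition, same cost).

-- ===== PORT A =====
-- literal port of A: a dict of replacements, then one str.replace per item
def fix_compression_strategy_variants (content : String) : String :=
  let replacements : PySem.Dict String String :=
    (((PySem.Dict.empty : PySem.Dict String String).insert
        "CompressionStrategy::TT_SVD" "CompressionStrategy::TensorTrain").insert
        "CompressionStrategy::Hybrid" "CompressionStrategy::HybridMps")
  replacements.items.foldl (fun content p => PySem.Str.replace content p.1 p.2) content

-- ===== PORT B =====
-- Source B's module dict _REPLACEMENTS, as char lists (both keys have 27 characters)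
def pvP1 : List Char := "CompressionStrategy::TT_SVD".toList
def pvR1 : List Char := "CompressionStrategy::TensorTrain".toList
def pvP2 : List Char := "CompressionStrategy::Hybrid".toList
def pvR2 : List Char := "CompressionStrategy::HybridMps".toList

-- literal port of B's single scan (Source B's while loop over positions, as recursion on the char list):
-- at each position, try key 1 then key 2 (Source B's dict iteration order); on a match emit the
-- replacement and skip the key's 27 characters, otherwise copy one character.
def pvScanB : List Char → List Char
  | [] => []
  | c :: t =>
    if pvP1.isPrefixOf (c :: t) then pvR1 ++ pvScanB (t.drop 26)
    else if pvP2.isPrefixOf (c :: t) then pvR2 ++ pvScanB (t.drop 26)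
    else c :: pvScanB t
termination_by s => s.length
decreasing_by
  all_goals simp

def fix_compression_strategy_variants_alt (content : String) : String :=
  String.ofList (pvScanB content.toList)

-- ===== PRECONDITION & SPEC =====
def Spec_fix_compression_strategy_variants (content : String) (out : String) : Prop := out = fix_compression_strategy_variants_alt content
instance (content : String) (out : String) : Decidable (Spec_fix_compression_strategy_variants content out) := by unfold Spec_fix_compression_strategy_variants; infer_instance

-- ===== CLAIM (what is proved, stated in full; the proofs are below) =====
def Claim_equal_fix_compression_strategy_variants : Prop := ∀ (content : String), Dom_fix_compression_strategy_variants content → Spec_fix_compression_strategy_variants content (fix_compression_strategy_variants content)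

-- ===== LEMMAS AND PROOFS =====

-- fuel-free model of PySem.Chars.replace for a nonempty pattern
def pvRep (old new : List Char) : List Char → List Char
  | [] => []
  | c :: t =>
    if old.isPrefixOf (c :: t) then new ++ pvRep old new (t.drop (old.length - 1))
    else c :: pvRep old new t
termination_by s => s.length
decreasing_by
  all_goals simp

theorem pvGo_eq (old new : List Char) (hold : old ≠ []) :
    ∀ fuel (l acc : List Char), l.length ≤ fuel →
      PySem.Chars.replace.go old new fuel l acc = acc.reverse ++ pvRep old new l := by
  intro fuel
  induction fuel with
  | zero =>
    intro l acc hl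
    have : l = [] := by cases l <;> simp_all
    subst this
    simp [PySem.Chars.replace.go, pvRep]
  | succ n ih =>
    intro l acc hl
    cases l with
    | nil => simp [PySem.Chars.replace.go, pvRep]
    | cons c t =>
      have hlt : t.length ≤ n := by simp at hl; omega
      rw [PySem.Chars.replace.go]
      by_cases h : old.isPrefixOf (c :: t)
      · simp only [h, if_true]
        obtain ⟨k, hk⟩ : ∃ k, old.length = k + 1 := by
          cases old with
          | nil => exact absurd rfl hold
          | cons a b => exact ⟨b.length, rfl⟩
        have hdrop : List.drop old.length (c :: t) = t.drop (old.length - 1) := by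
          rw [hk]; simp
        have hlen2 : (t.drop (old.length - 1)).length ≤ n := by
          simp only [List.length_drop]; omega
        rw [hdrop, ih (t.drop (old.length - 1)) (new.reverse ++ acc) hlen2]
        rw [pvRep, if_pos h]
        simp
      · rw [if_neg (by simp [h]), ih t (c :: acc) hlt]
        rw [pvRep, if_neg h]
        simp

theorem pvReplace_eq (old new s : List Char) (hold : old ≠ []) :
    PySem.Chars.replace s old new = pvRep old new s := by
  rw [PySem.Chars.replace]
  rw [if_neg (by simp [List.isEmpty_iff, hold])]
  simpa using pvGo_eq old new hold s.length s [] le_rfl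

-- the port of A, unfolded: two sequential replaces
theorem pvA_eq (content : String) :
    fix_compression_strategy_variants content =
      String.ofList (pvRep pvP2 pvR2 (pvRep pvP1 pvR1 content.toList)) := by
  have h1 : "CompressionStrategy::TT_SVD".toList ≠ [] := by decide
  have h2 : "CompressionStrategy::Hybrid".toList ≠ [] := by decide
  show PySem.Str.replace (PySem.Str.replace content
        "CompressionStrategy::TT_SVD" "CompressionStrategy::TensorTrain")
        "CompressionStrategy::Hybrid" "CompressionStrategy::HybridMps" = _
  simp only [PySem.Str.replace, String.toList_ofList]
  rw [pvReplace_eq "CompressionStrategy::TT_SVD".toList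
        "CompressionStrategy::TensorTrain".toList content.toList h1,
      pvReplace_eq "CompressionStrategy::Hybrid".toList
        "CompressionStrategy::HybridMps".toList _ h2]
  rfl

-- a position mismatch rules out a prefix match through any continuation
def pvMismatch (u p : List Char) : Bool :=
  (List.range (min u.length p.length)).any (fun i => u[i]? != p[i]?)

theorem pvNotPrefix_of_mismatch {u p : List Char} (h : pvMismatch u p = true) (rest : List Char) :
    ¬ p <+: (u ++ rest) := by
  rintro hp
  obtain ⟨i, hmem, hne⟩ := List.any_eq_true.mp h
  rw [List.mem_range] at hmem
  have hiu : i < u.length := lt_of_lt_of_le hmem (min_le_left _ _)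
  have hip : i < p.length := lt_of_lt_of_le hmem (min_le_right _ _)
  apply bne_iff_ne.mp hne
  have h1 := List.prefix_iff_eq_take.mp hp
  calc u[i]? = ((u ++ rest).take p.length)[i]? := by
        rw [List.getElem?_take_of_lt hip, List.getElem?_append_left hiu]
    _ = p[i]? := by rw [← h1]

-- a block all of whose suffixes mismatch `old` passes through pvRep unchanged
theorem pvRep_block (old new : List Char) (b : List Char)
    (h : ∀ k, k < b.length → pvMismatch (b.drop k) old = true) (x : List Char) :
    pvRep old new (b ++ x) = b ++ pvRep old new x := by
  induction b with
  | nil => simp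
  | cons c b' ih =>
    have hnp : ¬ old.isPrefixOf (c :: (b' ++ x)) := by
      rw [List.isPrefixOf_iff_prefix]
      have := pvNotPrefix_of_mismatch (h 0 (by simp)) x
      simpa using this
    rw [show (c :: b') ++ x = c :: (b' ++ x) from rfl, pvRep, if_neg hnp]
    rw [ih (fun k hk => by simpa using h (k + 1) (by simp; omega))]
    simp

-- pvRep consumes its own pattern at the head of the input
theorem pvRep_head (old new x : List Char) (hold : old ≠ []) :
    pvRep old new (old ++ x) = new ++ pvRep old new x := by
  cases hol : old with
  | nil => exact absurd hol hold
  | cons a b =>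
    rw [show (a :: b) ++ x = a :: (b ++ x) from rfl, pvRep,
        if_pos (by rw [List.isPrefixOf_iff_prefix]; exact ⟨x, rfl⟩)]
    have : (a :: b).length - 1 = b.length := by simp
    rw [this, List.drop_left]

theorem pvPrefix_of_prefix_append {p b x : List Char} (h : p <+: b ++ x)
    (hlen : p.length ≤ b.length) : p <+: b := by
  have := List.prefix_iff_eq_take.mp h
  rw [List.take_append_of_le_length hlen] at this
  exact List.prefix_iff_eq_take.mpr this

-- the first pass cannot create a (suffix of a) pvP2 occurrence
theorem pvNoCreate : ∀ n (s : List Char), s.length ≤ n → ∀ k, k < 27 →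
    (pvP2.drop k) <+: pvRep pvP1 pvR1 s → (pvP2.drop k) <+: s := by
  intro n
  induction n with
  | zero =>
    intro s hs k hk hp
    have : s = [] := by cases s <;> simp_all
    subst this
    rw [pvRep] at hp
    exfalso
    have hne : pvP2.drop k ≠ [] := by
      have : (pvP2.drop k).length = 27 - k := by simp [pvP2]
      intro h; rw [h] at this; simp at this; omega
    exact hne (List.prefix_nil.mp hp)
  | succ n ih =>
    intro s hs k hk hp
    cases s with
    | nil =>
      rw [pvRep] at hp
      exfalso
      have hne : pvP2.drop k ≠ [] := by
        have : (pvP2.drop k).length = 27 - k := by simp [pvP2]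
        intro h; rw [h] at this; simp at this; omega
      exact hne (List.prefix_nil.mp hp)
    | cons c t =>
      rw [pvRep] at hp
      by_cases h1 : pvP1.isPrefixOf (c :: t)
      · rw [if_pos h1] at hp
        exfalso
        have hlen : (pvP2.drop k).length ≤ pvR1.length := by simp [pvP2, pvR1]; omega
        have hpre := pvPrefix_of_prefix_append hp hlen
        revert hpre
        have : ∀ k', k' < 27 → ¬ (pvP2.drop k') <+: pvR1 := by decide
        exact this k hk
      · rw [if_neg h1] at hp
        rcases hdk : pvP2.drop k with _ | ⟨v, v'⟩
        · simp
        · rw [hdk] at hp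
          rw [List.cons_prefix_cons] at hp
          obtain ⟨hv, hp'⟩ := hp
          rw [List.cons_prefix_cons]
          have hv' : v' = pvP2.drop (k + 1) := by
            have h := congrArg (List.drop 1) hdk
            rw [List.drop_drop] at h
            simpa using h.symm
          refine ⟨hv, ?_⟩
          by_cases hk1 : k + 1 < 27
          · have := ih t (by simp at hs; omega) (k + 1) hk1 (hv' ▸ hp')
            exact hv' ▸ this
          · have hnil : v' = [] := by
              rw [hv']
              simp [pvP2]
              omega
            rw [hnil]
            simp

-- main: the two sequential passes equal the single scan
theorem pvMain : ∀ n (s : List Char), s.length ≤ n →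
    pvRep pvP2 pvR2 (pvRep pvP1 pvR1 s) = pvScanB s := by
  intro n
  induction n with
  | zero =>
    intro s hs
    have : s = [] := by cases s <;> simp_all
    subst this
    rw [pvRep, pvRep, pvScanB]
  | succ n ih =>
    intro s hs
    cases s with
    | nil => rw [pvRep, pvRep, pvScanB]
    | cons c t =>
      have ht : t.length ≤ n := by simp at hs; omega
      have htd : (t.drop 26).length ≤ n := by simp only [List.length_drop]; omega
      rw [pvScanB]
      by_cases h1 : pvP1.isPrefixOf (c :: t)
      · rw [if_pos h1]
        have hlen1 : pvP1.length - 1 = 26 := by decide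
        rw [pvRep, if_pos h1, hlen1]
        have hpass : pvRep pvP2 pvR2 (pvR1 ++ pvRep pvP1 pvR1 (t.drop 26)) =
            pvR1 ++ pvRep pvP2 pvR2 (pvRep pvP1 pvR1 (t.drop 26)) :=
          pvRep_block pvP2 pvR2 pvR1 (by decide) _
        rw [hpass, ih (t.drop 26) htd]
      · rw [if_neg h1]
        by_cases h2 : pvP2.isPrefixOf (c :: t)
        · rw [if_pos h2]
          have h27 : pvP2.length = 27 := by decide
          have hsplit : c :: t = pvP2 ++ t.drop 26 := by
            obtain ⟨u, hu⟩ := List.isPrefixOf_iff_prefix.mp h2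
            have hd : List.drop 27 (pvP2 ++ u) = u := by
              rw [← h27]; exact List.drop_left
            have hd2 : List.drop 27 (c :: t) = t.drop 26 := by simp
            have hu' : u = t.drop 26 := by rw [← hd, hu, hd2]
            rw [← hu, hu']
          rw [hsplit]
          have hpass1 : pvRep pvP1 pvR1 (pvP2 ++ t.drop 26) =
              pvP2 ++ pvRep pvP1 pvR1 (t.drop 26) :=
            pvRep_block pvP1 pvR1 pvP2 (by decide) _
          rw [hpass1, pvRep_head pvP2 pvR2 _ (by decide), ih (t.drop 26) htd]
        · rw [if_neg h2]
          have hstep : pvRep pvP1 pvR1 (c :: t) = c :: pvRep pvP1 pvR1 t := by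
            rw [pvRep, if_neg h1]
          rw [hstep]
          have hnc : ¬ pvP2.isPrefixOf (c :: pvRep pvP1 pvR1 t) := by
            intro hpp
            apply h2
            rw [List.isPrefixOf_iff_prefix] at hpp ⊢
            rw [← hstep] at hpp
            have := pvNoCreate (c :: t).length (c :: t) le_rfl 0 (by omega)
            simpa using this (by simpa using hpp)
          rw [pvRep, if_neg hnc, ih t ht]

-- ===== VERDICT (by name: the statement is the Claim_ definition above) =====
theorem fix_compression_strategy_variants_spec : Claim_equal_fix_compression_strategy_variants := by
  intro content _
  unfold Spec_fix_compression_strategy_variants fix_compression_strategy_variants_alt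
  rw [pvA_eq]
  rw [pvMain content.toList.length content.toList le_rfl]
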